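-- pv_equiv track=rewrite | github.com/ali1hammoud/GeneticAlgorithm-GraphColoringProblem | main_test.py | optimal_solution
-- ===== SOURCE A (Python) =====
-- def optimal_solution(list_first_solution, list_fitness_solution):
--     list_fittest_solution = list(zip(list_fitness_solution,list_first_solution))
--     sorted_list_fittest_solution = sorted(list_fittest_solution, key=lambda k:k[0])
--     solution=list(filter(lambda x: x[0] == sorted_list_fittest_solution[0][0], sorted_list_fittest_solution))
--     list_solution=[x[1] for x in solution]
--     list_optimal_solution = []
--     for x in list_solution:
--         if x not in list_optimal_solution:
--             list_optimal_solution.append(x)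
--     return list_optimal_solution
-- ===== SOURCE B (Python) =====
-- def optimal_solution(list_first_solution, list_fitness_solution):
--     pairs = list(zip(list_fitness_solution, list_first_solution))
--     if not pairs:
--         return []
--     best = min(f for f, _ in pairs)
--     result = []
--     for f, s in pairs:
--         if f == best and s not in result:
--             result.append(s)
--     return result
-- ===== Notes on version B (the rewrite author's own statement) =====
-- stated objective: simpler
-- what changed: Replaces sort-by-fitness + filter-on-sorted-head + separate dedup loop by computing the minimum fitness directly and then a single guarded pass over the zipped pairs that collects unseen solutions with that fitness.
import Mathlib
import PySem

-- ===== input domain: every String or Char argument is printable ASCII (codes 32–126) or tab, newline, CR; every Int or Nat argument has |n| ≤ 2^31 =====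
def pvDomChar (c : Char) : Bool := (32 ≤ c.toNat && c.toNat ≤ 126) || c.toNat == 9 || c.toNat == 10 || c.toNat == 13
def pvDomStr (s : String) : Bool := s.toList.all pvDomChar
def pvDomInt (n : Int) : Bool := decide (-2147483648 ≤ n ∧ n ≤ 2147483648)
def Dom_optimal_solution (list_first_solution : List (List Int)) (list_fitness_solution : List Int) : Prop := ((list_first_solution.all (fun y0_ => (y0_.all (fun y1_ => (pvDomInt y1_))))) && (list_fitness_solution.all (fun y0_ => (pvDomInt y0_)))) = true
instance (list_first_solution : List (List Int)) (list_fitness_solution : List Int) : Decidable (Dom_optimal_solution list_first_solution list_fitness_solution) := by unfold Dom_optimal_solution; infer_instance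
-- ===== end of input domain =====

-- B replaces sort-then-filter-then-dedup by a single pass over the zipped pairs with the
-- minimum fitness computed up front (objective: simpler; return-value equivalence only).

-- ===== PORT A =====
-- Python's filter is lazy: on an empty zip the lambda (and sorted[0]) is never evaluated,
-- so A returns [] there; the match on the sorted list reflects exactly that.
def optimal_solution (list_first_solution : List (List Int)) (list_fitness_solution : List Int) : List (List Int) :=
  let list_fittest_solution := list_fitness_solution.zip list_first_solution
  let sorted_list_fittest_solution := PySem.List.sorted list_fittest_solution (fun k => k.1) false
  match sorted_list_fittest_solution with
  | [] => []
  | h :: t =>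
    let solution := (h :: t).filter (fun x => x.1 == h.1)
    let list_solution := solution.map (fun x => x.2)
    list_solution.foldl (fun acc x => if x ∉ acc then acc ++ [x] else acc) []

-- ===== PORT B =====
def optimal_solution_alt (list_first_solution : List (List Int)) (list_fitness_solution : List Int) : List (List Int) :=
  let pairs := list_fitness_solution.zip list_first_solution
  match PySem.List.min? (pairs.map Prod.fst) (fun x => x) with
  | none => []  -- pairs empty: early return []
  | some best =>
    pairs.foldl (fun result q => if q.1 == best ∧ q.2 ∉ result then result ++ [q.2] else result) []

-- ===== PRECONDITION & SPEC =====
def Spec_optimal_solution (list_first_solution : List (List Int)) (list_fitness_solution : List Int) (out : List (List Int)) : Prop := out = optimal_solution_alt list_first_solution list_fitness_solution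
instance (list_first_solution : List (List Int)) (list_fitness_solution : List Int) (out : List (List Int)) : Decidable (Spec_optimal_solution list_first_solution list_fitness_solution out) := by unfold Spec_optimal_solution; infer_instance

-- ===== CLAIM (what is proved, stated in full; the proofs are below) =====
def Claim_equal_optimal_solution : Prop := ∀ (list_first_solution : List (List Int)) (list_fitness_solution : List Int), Dom_optimal_solution list_first_solution list_fitness_solution → Spec_optimal_solution list_first_solution list_fitness_solution (optimal_solution list_first_solution list_fitness_solution)

-- ===== LEMMAS AND PROOFS =====

-- inserting an element whose key differs from m does not change the (key = m) filter
theorem filter_insertBy_ne {α : Type} (key : α → Int) (m : Int) (x : α) (hx : key x ≠ m)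
    (ys : List α) :
    (PySem.List.insertBy (fun a b => decide (key a < key b)) x ys).filter (fun z => key z == m)
      = ys.filter (fun z => key z == m) := by
  induction ys with
  | nil => simp [PySem.List.insertBy, hx]
  | cons y ys ih =>
    simp only [PySem.List.insertBy]
    by_cases h : key x < key y
    · simp [h, hx]
    · simp only [h, decide_false, List.filter_cons]
      by_cases hy : key y == m <;> simp [hy, ih]

-- inserting a minimal-key element into a key-sorted list appends it to the (key = m) filter
theorem filter_insertBy_eq {α : Type} (key : α → Int) (m : Int) (x : α) (hx : key x = m)
    (ys : List α) (hs : ys.Pairwise (fun a b => key a ≤ key b)) :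
    (PySem.List.insertBy (fun a b => decide (key a < key b)) x ys).filter (fun z => key z == m)
      = ys.filter (fun z => key z == m) ++ [x] := by
  induction ys with
  | nil => simp [PySem.List.insertBy, hx]
  | cons y ys ih =>
    simp only [PySem.List.insertBy]
    by_cases h : key x < key y
    · -- all keys in y :: ys exceed m, so the old filter is empty
      have hall : ∀ z ∈ y :: ys, ¬ (key z == m) := by
        intro z hz
        have : key y ≤ key z := by
          rcases List.mem_cons.mp hz with rfl | hz
          · exact le_refl _
          · exact (List.pairwise_cons.mp hs).1 z hz
        simp only [beq_iff_eq]
        omega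
      have : (y :: ys).filter (fun z => key z == m) = [] := by
        simp only [List.filter_eq_nil_iff]
        intro z hz; exact hall z hz
      have h' : m < key y := hx ▸ h
      simp [h', hx, this]
    · simp only [h, decide_false, List.filter_cons]
      have ih' := ih (List.pairwise_cons.mp hs).2
      by_cases hy : key y == m <;> simp [hy, ih']

-- stability: filtering one key class commutes with the stable sort
theorem filter_sorted_key {α : Type} (key : α → Int) (m : Int) (xs : List α) :
    (PySem.List.sorted xs key false).filter (fun z => key z == m)
      = xs.filter (fun z => key z == m) := by
  induction xs using List.reverseRecOn with
  | nil => simp [PySem.List.sorted_eq_foldl_insertBy]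
  | append_singleton xs x ih =>
    have hstep : PySem.List.sorted (xs ++ [x]) key false
        = PySem.List.insertBy (fun a b => decide (key a < key b)) x (PySem.List.sorted xs key false) := by
      rw [PySem.List.sorted_eq_foldl_insertBy, PySem.List.sorted_eq_foldl_insertBy, List.foldl_append]
      simp
    rw [hstep]
    by_cases hx : key x = m
    · rw [filter_insertBy_eq key m x hx _ (PySem.List.sorted_pairwise xs key), ih]
      simp [hx]
    · rw [filter_insertBy_ne key m x hx, ih]
      simp [List.filter_append, hx]

-- B's guarded single pass = dedup pass over the filtered seconds
theorem foldB_eq (m : Int) (l : List (Int × List Int)) (acc : List (List Int)) :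
    l.foldl (fun result q => if q.1 == m ∧ q.2 ∉ result then result ++ [q.2] else result) acc
      = ((l.filter (fun q => q.1 == m)).map (fun x => x.2)).foldl
          (fun acc x => if x ∉ acc then acc ++ [x] else acc) acc := by
  induction l generalizing acc with
  | nil => simp
  | cons q l ih =>
    simp only [List.foldl_cons, List.filter_cons]
    by_cases h1 : q.1 == m
    · rw [if_pos h1]
      simp only [List.map_cons, List.foldl_cons]
      by_cases h2 : q.2 ∈ acc
      · rw [if_neg (by simp [h2]), if_neg (by simp [h2]), ih]
      · rw [if_pos ⟨h1, h2⟩, if_pos h2, ih]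
    · rw [if_neg h1, if_neg (fun hh => h1 hh.1), ih]

-- ===== VERDICT (by name: the statement is the Claim_ definition above) =====
theorem optimal_solution_spec : Claim_equal_optimal_solution := by
  intro lfs lfit _
  unfold Spec_optimal_solution
  show optimal_solution lfs lfit = optimal_solution_alt lfs lfit
  cases hz : lfit.zip lfs with
  | nil =>
    simp only [optimal_solution, optimal_solution_alt, hz]
    rw [(PySem.List.sorted_eq_nil_iff _ _ _).mpr rfl, (PySem.List.min?_eq_none_iff _ _).mpr (by simp)]
  | cons p ps =>
    simp only [optimal_solution, optimal_solution_alt, hz]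
    cases heq : PySem.List.sorted (p :: ps) (fun k => k.1) false with
    | nil => exact absurd ((PySem.List.sorted_eq_nil_iff _ _ _).mp heq) (by simp)
    | cons h t =>
      cases hmin : PySem.List.min? ((p :: ps).map Prod.fst) (fun x => x) with
      | none => exact absurd ((PySem.List.min?_eq_none_iff _ _).mp hmin) (by simp)
      | some m =>
        -- the head of the sorted list carries the minimum fitness
        have hmem : m ∈ (p :: ps).map Prod.fst := PySem.List.min?_mem hmin
        obtain ⟨q, hq, hqm⟩ := List.mem_map.mp hmem
        have h1 : h.1 ≤ m := by
          have := PySem.List.key_head_sorted_le (p :: ps) (fun k => k.1) heq q hq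
          simp only at this
          omega
        have h2 : m ≤ h.1 := by
          have hmemh : h ∈ p :: ps :=
            (PySem.List.mem_sorted (p :: ps) (fun k => k.1) false h).mp (heq ▸ List.mem_cons_self)
          have := PySem.List.min?_isMin hmin h.1 (List.mem_map_of_mem hmemh)
          simp only at this
          omega
        have h1m : h.1 = m := le_antisymm h1 h2
        simp only []
        rw [foldB_eq, h1m, ← filter_sorted_key (fun k => k.1) m (p :: ps), heq]
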